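-- pv_equiv track=rewrite | github.com/chuphal-11/model_system | pipeline/behavior_engine.py | _categorize_students
-- ===== SOURCE A (Python) =====
-- def _categorize_students(smoothed_entities):
--     """Categorize each student as participating, distracted, or inactive."""
--     participating = 0
--     distracted = 0
--     inactive = 0
--     total = 0
--
--     for entity in smoothed_entities:
--         confirmed = entity.get("confirmed_activities", {})
--
--         if "teacher" in confirmed:
--             continue
--
--         total += 1
--
--         productive = {"hand-raising", "read", "write", "discuss"}
--         disruptive = {"talk", "stand"}
--
--         has_productive = bool(productive & set(confirmed.keys()))
--         has_disruptive = bool(disruptive & set(confirmed.keys()))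
--
--         if has_productive:
--             participating += 1
--         elif has_disruptive:
--             distracted += 1
--         else:
--             inactive += 1
--
--     return {
--         "participating": participating,
--         "distracted": distracted,
--         "inactive": inactive,
--         "total": total,
--     }
-- ===== SOURCE B (Python) =====
-- RANK = {"teacher": 0, "hand-raising": 1, "read": 1, "write": 1,
--         "discuss": 1, "talk": 2, "stand": 2}
--
--
-- def _categorize_students(smoothed_entities):
--     """Categorize each student as participating, distracted, or inactive."""
--     counts = [0, 0, 0, 0]  # rank 0 = teacher, 1 = participating, 2 = distracted, 3 = inactive
--     for entity in smoothed_entities: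
--         rank = min(
--             (RANK.get(activity, 3) for activity in entity.get("confirmed_activities", {})),
--             default=3,
--         )
--         counts[rank] += 1
--     return {
--         "participating": counts[1],
--         "distracted": counts[2],
--         "inactive": counts[3],
--         "total": counts[1] + counts[2] + counts[3],
--     }
-- ===== Notes on version B (the rewrite author's own statement) =====
-- stated objective: alternative
-- what changed: Replaces the set-intersection tests and if/elif/else priority chain with a priority-rank table: each activity maps to a rank (teacher=0, productive=1, disruptive=2, other=3), each entity is classified as the minimum rank over its confirmed activities, and ranks are tallied into a 4-slot counter from which the result (total by summation) is read.
import Mathlib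
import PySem

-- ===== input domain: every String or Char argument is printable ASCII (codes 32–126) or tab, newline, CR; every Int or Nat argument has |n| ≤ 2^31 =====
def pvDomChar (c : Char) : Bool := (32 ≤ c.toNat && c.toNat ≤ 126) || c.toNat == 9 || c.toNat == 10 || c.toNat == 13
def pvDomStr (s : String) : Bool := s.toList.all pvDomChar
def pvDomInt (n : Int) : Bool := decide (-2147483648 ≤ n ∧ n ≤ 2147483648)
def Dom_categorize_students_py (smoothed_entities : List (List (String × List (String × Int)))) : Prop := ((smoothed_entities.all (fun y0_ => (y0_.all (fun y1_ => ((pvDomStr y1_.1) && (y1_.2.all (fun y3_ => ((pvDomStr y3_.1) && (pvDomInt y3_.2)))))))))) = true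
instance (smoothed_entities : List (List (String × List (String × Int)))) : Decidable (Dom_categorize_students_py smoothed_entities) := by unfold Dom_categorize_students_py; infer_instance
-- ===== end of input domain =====

-- B replaces A's set intersections and if/elif priority chain by a priority-rank table
-- (teacher=0, productive=1, disruptive=2, other=3): each entity is classified as the
-- minimum rank of its confirmed activities and ranks are tallied; same O(n) cost.

-- ===== PORT A =====
-- entity.get("confirmed_activities", {}) as the inner assoc-list dict
def pvConfirmedA (entity : List (String × List (String × Int))) : List (String × Int) :=
  PySem.Dict.getD (PySem.Dict.mk entity) "confirmed_activities" []

-- one iteration of A's for-loop body on the (participating, distracted, inactive, total) state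
def pvStepA (acc : Int × Int × Int × Int) (entity : List (String × List (String × Int))) :
    Int × Int × Int × Int :=
  let confirmed := pvConfirmedA entity
  if PySem.Dict.contains (PySem.Dict.mk confirmed) "teacher" then acc
  else
    let total := acc.2.2.2 + 1
    let productive : PySem.Set String := PySem.Set.ofList ["hand-raising", "read", "write", "discuss"]
    let disruptive : PySem.Set String := PySem.Set.ofList ["talk", "stand"]
    let has_productive := !(PySem.Set.inter productive (PySem.Set.ofList (PySem.Dict.keys (PySem.Dict.mk confirmed)))).isEmpty
    let has_disruptive := !(PySem.Set.inter disruptive (PySem.Set.ofList (PySem.Dict.keys (PySem.Dict.mk confirmed)))).isEmpty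
    if has_productive then (acc.1 + 1, acc.2.1, acc.2.2.1, total)
    else if has_disruptive then (acc.1, acc.2.1 + 1, acc.2.2.1, total)
    else (acc.1, acc.2.1, acc.2.2.1 + 1, total)

def categorize_students_py (smoothed_entities : List (List (String × List (String × Int)))) : List (String × Int) :=
  let st := smoothed_entities.foldl pvStepA (0, 0, 0, 0)
  [("participating", st.1), ("distracted", st.2.1), ("inactive", st.2.2.1), ("total", st.2.2.2)]

-- ===== PORT B =====
-- the module-level RANK table
def pvRankDict : PySem.Dict String Int :=
  PySem.Dict.mk [("teacher", 0), ("hand-raising", 1), ("read", 1), ("write", 1),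
                 ("discuss", 1), ("talk", 2), ("stand", 2)]

-- RANK.get(activity, 3)
def pvRank (activity : String) : Int := PySem.Dict.getD pvRankDict activity 3

-- min((RANK.get(a, 3) for a in entity.get("confirmed_activities", {})), default=3)
def pvRankEnt (entity : List (String × List (String × Int))) : Int :=
  let ks := PySem.Dict.keys (PySem.Dict.mk (PySem.Dict.getD (PySem.Dict.mk entity) "confirmed_activities" []))
  match PySem.List.min? (ks.map pvRank) (fun x => x) with
  | none => 3
  | some r => r

-- counts[rank] += 1 on the 4-slot counter
def pvStepB (counts : Int × Int × Int × Int) (entity : List (String × List (String × Int))) :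
    Int × Int × Int × Int :=
  let r := pvRankEnt entity
  if r = 0 then (counts.1 + 1, counts.2.1, counts.2.2.1, counts.2.2.2)
  else if r = 1 then (counts.1, counts.2.1 + 1, counts.2.2.1, counts.2.2.2)
  else if r = 2 then (counts.1, counts.2.1, counts.2.2.1 + 1, counts.2.2.2)
  else (counts.1, counts.2.1, counts.2.2.1, counts.2.2.2 + 1)

def categorize_students_py_alt (smoothed_entities : List (List (String × List (String × Int)))) : List (String × Int) :=
  let c := smoothed_entities.foldl pvStepB (0, 0, 0, 0)
  [("participating", c.2.1), ("distracted", c.2.2.1), ("inactive", c.2.2.2),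
   ("total", c.2.1 + c.2.2.1 + c.2.2.2)]

-- ===== PRECONDITION & SPEC =====
def Spec_categorize_students_py (smoothed_entities : List (List (String × List (String × Int)))) (out : List (String × Int)) : Prop := out = categorize_students_py_alt smoothed_entities
instance (smoothed_entities : List (List (String × List (String × Int)))) (out : List (String × Int)) : Decidable (Spec_categorize_students_py smoothed_entities out) := by unfold Spec_categorize_students_py; infer_instance

-- ===== CLAIM (what is proved, stated in full; the proofs are below) =====
def Claim_equal_categorize_students_py : Prop := ∀ (smoothed_entities : List (List (String × List (String × Int)))), Dom_categorize_students_py smoothed_entities → Spec_categorize_students_py smoothed_entities (categorize_students_py smoothed_entities)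

-- ===== LEMMAS AND PROOFS =====

-- pvRank, spelled out over the literal RANK table
theorem pvRank_eq (k : String) :
    pvRank k =
      if k = "teacher" then 0
      else if k = "hand-raising" ∨ k = "read" ∨ k = "write" ∨ k = "discuss" then 1
      else if k = "talk" ∨ k = "stand" then 2
      else 3 := by
  simp only [pvRank, pvRankDict, PySem.Dict.getD, PySem.Dict.get?_mk_cons, beq_iff_eq]
  split_ifs <;> simp_all [PySem.Dict.get?, eq_comm]

theorem pvRank_le (k : String) : pvRank k ≤ 3 := by
  rw [pvRank_eq]; split_ifs <;> omega

-- min(..., default=3) over a key list, as a function of the list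
def pvMin3 (ks : List String) : Int :=
  match PySem.List.min? (ks.map pvRank) (fun x => x) with
  | none => 3
  | some r => r

theorem foldl_min_min (l : List Int) (a b : Int) :
    l.foldl min (min a b) = min a (l.foldl min b) := by
  induction l generalizing b with
  | nil => rfl
  | cons x t ih => simp only [List.foldl_cons, min_assoc, ih]

theorem pvMin3_cons (k : String) (ks : List String) :
    pvMin3 (k :: ks) = min (pvRank k) (pvMin3 ks) := by
  have key : ∀ l : List String, pvMin3 l = (l.map pvRank).foldl min 3 := by
    intro l
    cases l with
    | nil => rfl
    | cons x t =>
      simp only [pvMin3, List.map_cons, PySem.List.min?_id_cons, List.foldl_cons]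
      rw [min_comm 3 (pvRank x), min_eq_left (pvRank_le x)]
  rw [key, key, List.map_cons, List.foldl_cons]
  rw [min_comm 3 (pvRank k), foldl_min_min]

theorem pv_contraP {ks : List String} {C : Prop}
    (h : ∀ x ∈ ks, ¬x = "hand-raising" ∧ ¬x = "read" ∧ ¬x = "write" ∧ ¬x = "discuss")
    (he : ∃ a ∈ ks, a = "hand-raising" ∨ a = "read" ∨ a = "write" ∨ a = "discuss") : C :=
  False.elim (by obtain ⟨a, ha, hc⟩ := he; have := h a ha; tauto)

theorem pv_contraD {ks : List String} {C : Prop}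
    (h : ∀ x ∈ ks, ¬x = "talk" ∧ ¬x = "stand")
    (he : ∃ a ∈ ks, a = "talk" ∨ a = "stand") : C :=
  False.elim (by obtain ⟨a, ha, hc⟩ := he; have := h a ha; tauto)

-- the entity rank, characterized by key membership (the shape of A's branch tests)
theorem pvMin3_char (ks : List String) :
    pvMin3 ks =
      if "teacher" ∈ ks then 0
      else if ∃ k ∈ ks, k = "hand-raising" ∨ k = "read" ∨ k = "write" ∨ k = "discuss" then 1
      else if ∃ k ∈ ks, k = "talk" ∨ k = "stand" then 2
      else 3 := by
  induction ks with
  | nil => simp [pvMin3, PySem.List.min?]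
  | cons k ks ih =>
    rw [pvMin3_cons, ih, pvRank_eq]
    simp only [List.mem_cons]
    split_ifs <;> simp_all
    all_goals first
      | exact pv_contraP ‹_› ‹_›
      | exact pv_contraD ‹_› ‹_›

theorem pvRankEnt_eq_min3 (entity : List (String × List (String × Int))) :
    pvRankEnt entity = pvMin3 (PySem.Dict.keys (PySem.Dict.mk (pvConfirmedA entity))) := rfl

-- B's one-hot increment, shifted by the initial counter
theorem pvStepB_eq (a : Int × Int × Int × Int) (e : List (String × List (String × Int))) :
    pvStepB a e =
      (a.1 + (pvStepB (0, 0, 0, 0) e).1, a.2.1 + (pvStepB (0, 0, 0, 0) e).2.1,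
       a.2.2.1 + (pvStepB (0, 0, 0, 0) e).2.2.1, a.2.2.2 + (pvStepB (0, 0, 0, 0) e).2.2.2) := by
  simp only [pvStepB]
  split_ifs <;> simp

theorem pv_foldB_shift (es : List (List (String × List (String × Int)))) (a0 a1 a2 a3 : Int) :
    es.foldl pvStepB (a0, a1, a2, a3) =
      (a0 + (es.foldl pvStepB (0, 0, 0, 0)).1,
       a1 + (es.foldl pvStepB (0, 0, 0, 0)).2.1,
       a2 + (es.foldl pvStepB (0, 0, 0, 0)).2.2.1,
       a3 + (es.foldl pvStepB (0, 0, 0, 0)).2.2.2) := by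
  induction es generalizing a0 a1 a2 a3 with
  | nil => simp
  | cons e es ih =>
    simp only [List.foldl_cons]
    rw [pvStepB_eq (a0, a1, a2, a3) e, pvStepB_eq (0, 0, 0, 0) e]
    rw [ih, ih ((0:Int) + _) ((0:Int) + _) ((0:Int) + _) ((0:Int) + _)]
    simp only [Prod.mk.injEq]
    refine ⟨by ring, by ring, by ring, by ring⟩

-- A's loop body, expressed through B's entity rank
theorem pvStepA_eq (p d i t : Int) (e : List (String × List (String × Int))) :
    pvStepA (p, d, i, t) e =
      if pvRankEnt e = 0 then (p, d, i, t)
      else if pvRankEnt e = 1 then (p + 1, d, i, t + 1)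
      else if pvRankEnt e = 2 then (p, d + 1, i, t + 1)
      else (p, d, i + 1, t + 1) := by
  rw [pvRankEnt_eq_min3, pvMin3_char]
  simp only [pvStepA]
  by_cases ht : "teacher" ∈ PySem.Dict.keys (PySem.Dict.mk (pvConfirmedA e))
  · have hc : PySem.Dict.contains (PySem.Dict.mk (pvConfirmedA e)) "teacher" = true :=
      (PySem.Dict.contains_iff_mem_keys _ _).mpr ht
    simp only [hc, if_true, ht]
  · have hc : PySem.Dict.contains (PySem.Dict.mk (pvConfirmedA e)) "teacher" = false := by
      rw [← Bool.not_eq_true, PySem.Dict.contains_iff_mem_keys _ _]; exact ht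
    have hmemP : ∀ x : String, x ∈ (["hand-raising", "read", "write", "discuss"] : List String)
        ↔ (x = "hand-raising" ∨ x = "read" ∨ x = "write" ∨ x = "discuss") := by
      intro x; simp
    have hmemD : ∀ x : String, x ∈ (["talk", "stand"] : List String)
        ↔ (x = "talk" ∨ x = "stand") := by
      intro x; simp
    have hinter : ∀ (P : List String),
        (PySem.Set.inter (PySem.Set.ofList P)
          (PySem.Set.ofList (PySem.Dict.keys (PySem.Dict.mk (pvConfirmedA e))))).isEmpty = false
        ↔ ∃ k ∈ PySem.Dict.keys (PySem.Dict.mk (pvConfirmedA e)), k ∈ P := by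
      intro P
      rw [← Bool.not_eq_true, List.isEmpty_iff, List.eq_nil_iff_forall_not_mem]
      constructor
      · intro h
        by_contra hn
        push_neg at hn
        apply h
        intro x hx
        rw [PySem.Set.mem_inter, PySem.Set.mem_ofList, PySem.Set.mem_ofList] at hx
        exact hn x hx.2 hx.1
      · rintro ⟨k, hk, hkP⟩ h
        exact h k (by rw [PySem.Set.mem_inter, PySem.Set.mem_ofList, PySem.Set.mem_ofList]; exact ⟨hkP, hk⟩)
    simp only [hc, Bool.false_eq_true, if_false, if_neg ht]
    by_cases hp : ∃ k ∈ PySem.Dict.keys (PySem.Dict.mk (pvConfirmedA e)),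
        k = "hand-raising" ∨ k = "read" ∨ k = "write" ∨ k = "discuss"
    · have : (PySem.Set.inter (PySem.Set.ofList ["hand-raising", "read", "write", "discuss"])
          (PySem.Set.ofList (PySem.Dict.keys (PySem.Dict.mk (pvConfirmedA e))))).isEmpty = false := by
        rw [hinter]; obtain ⟨k, hk, h⟩ := hp; exact ⟨k, hk, (hmemP k).mpr h⟩
      simp only [ht, hp, this, Bool.not_false, if_true, if_false]
      norm_num
    · have hpe : (PySem.Set.inter (PySem.Set.ofList ["hand-raising", "read", "write", "discuss"])
          (PySem.Set.ofList (PySem.Dict.keys (PySem.Dict.mk (pvConfirmedA e))))).isEmpty = true := by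
        by_contra hx
        rw [Bool.not_eq_true, hinter] at hx
        exact hp (hx.imp fun k ⟨hk, h⟩ => ⟨hk, (hmemP k).mp h⟩)
      by_cases hd : ∃ k ∈ PySem.Dict.keys (PySem.Dict.mk (pvConfirmedA e)), k = "talk" ∨ k = "stand"
      · have : (PySem.Set.inter (PySem.Set.ofList ["talk", "stand"])
            (PySem.Set.ofList (PySem.Dict.keys (PySem.Dict.mk (pvConfirmedA e))))).isEmpty = false := by
          rw [hinter]; obtain ⟨k, hk, h⟩ := hd; exact ⟨k, hk, (hmemD k).mpr h⟩
        simp only [ht, hp, hd, hpe, this, Bool.not_true, Bool.not_false, if_true, if_false]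
        norm_num
      · have hde : (PySem.Set.inter (PySem.Set.ofList ["talk", "stand"])
            (PySem.Set.ofList (PySem.Dict.keys (PySem.Dict.mk (pvConfirmedA e))))).isEmpty = true := by
          by_contra hx
          rw [Bool.not_eq_true, hinter] at hx
          exact hd (hx.imp fun k ⟨hk, h⟩ => ⟨hk, (hmemD k).mp h⟩)
        simp only [ht, hp, hd, hpe, hde, Bool.not_true, if_false]
        norm_num

-- main invariant: A's fold equals B's rank tallies, shifted by the initial state
theorem pv_fold_inv (es : List (List (String × List (String × Int)))) (p d i t : Int) :
    es.foldl pvStepA (p, d, i, t) =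
      (let c := es.foldl pvStepB (0, 0, 0, 0)
       (p + c.2.1, d + c.2.2.1, i + c.2.2.2, t + c.2.1 + c.2.2.1 + c.2.2.2)) := by
  induction es generalizing p d i t with
  | nil => simp
  | cons e es ih =>
    simp only [List.foldl_cons]
    rw [pvStepA_eq]
    have hs : pvStepB (0, 0, 0, 0) e =
        (if pvRankEnt e = 0 then ((1:Int), 0, 0, 0) else if pvRankEnt e = 1 then (0, 1, 0, 0)
         else if pvRankEnt e = 2 then (0, 0, 1, 0) else (0, 0, 0, 1)) := by
      simp only [pvStepB]; split_ifs <;> rfl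
    rw [hs]
    split_ifs with h0 h1 h2
    · rw [ih, pv_foldB_shift es 1 0 0 0]
      simp only [Prod.mk.injEq]
      refine ⟨by ring, by ring, by ring, by ring⟩
    · rw [ih, pv_foldB_shift es 0 1 0 0]
      simp only [Prod.mk.injEq]
      refine ⟨by ring, by ring, by ring, by ring⟩
    · rw [ih, pv_foldB_shift es 0 0 1 0]
      simp only [Prod.mk.injEq]
      refine ⟨by ring, by ring, by ring, by ring⟩
    · rw [ih, pv_foldB_shift es 0 0 0 1]
      simp only [Prod.mk.injEq]
      refine ⟨by ring, by ring, by ring, by ring⟩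

-- ===== VERDICT (by name: the statement is the Claim_ definition above) =====
theorem categorize_students_py_spec : Claim_equal_categorize_students_py := by
  intro es _
  unfold Spec_categorize_students_py categorize_students_py categorize_students_py_alt
  rw [pv_fold_inv es 0 0 0 0]
  simp
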